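-- pv_equiv track=rewrite | github.com/bigponglee/TLR-BM-MRF | utils/Bloch_sim.py | get_batch_index
-- ===== SOURCE A (Python) =====
-- def get_batch_index(LEN, batch_size):
--     if LEN <= batch_size:
--         raise ValueError(
--             'The LEN should be longer than batch_size.')
--     num = LEN//batch_size
--     yu = LEN % batch_size
--     out = []
--     for i in range(num):
--         out.append([i*batch_size, (i+1)*batch_size])
--     if yu != 0:
--         out.append([num*batch_size, LEN])
--     return out
-- ===== SOURCE B (Python) =====
-- def get_batch_index(LEN, batch_size):
--     if LEN <= batch_size:
--         raise ValueError(
--             'The LEN should be longer than batch_size.')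
--     bounds = list(range(0, LEN, batch_size)) + [LEN]
--     return [[a, b] for a, b in zip(bounds, bounds[1:])]
-- ===== Notes on version B (the rewrite author's own statement) =====
-- stated objective: alternative
-- what changed: Replaces A's two-phase construction (floor-division batch count loop plus a separate modulo-tested remainder append) with a boundary-list algorithm: build the list of batch boundaries range(0, LEN, batch_size) + [LEN] once, then pair each boundary with its successor by zipping the list with its own tail; no floor division, modulo or remainder branch remains.
-- intended difference: For negative batch_size not dividing LEN (with batch_size < LEN), A returns a single out-of-range pair such as [[6, 5]] at (5, -2) - an artefact of Python floor division on negatives - while B returns the empty batch list, the intended value since no valid batch start exists. — e.g. on get_batch_index(5, -2): A returns [[6, 5]], B returns []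
import Mathlib
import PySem

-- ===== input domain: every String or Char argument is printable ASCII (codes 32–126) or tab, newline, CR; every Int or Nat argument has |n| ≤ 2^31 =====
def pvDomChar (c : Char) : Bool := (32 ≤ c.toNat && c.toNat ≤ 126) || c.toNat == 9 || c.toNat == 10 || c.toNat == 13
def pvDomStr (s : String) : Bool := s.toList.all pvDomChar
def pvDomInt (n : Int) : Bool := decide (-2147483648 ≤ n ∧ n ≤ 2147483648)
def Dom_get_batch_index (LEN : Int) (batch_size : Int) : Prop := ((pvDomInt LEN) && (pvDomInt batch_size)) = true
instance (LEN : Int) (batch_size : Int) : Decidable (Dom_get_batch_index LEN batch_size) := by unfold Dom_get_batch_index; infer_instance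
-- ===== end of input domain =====

-- B replaces A's two-phase construction (full-batch count loop + modulo-tested remainder
-- append) with a boundary list (batch starts plus LEN) zipped with its own tail
-- (objective: alternative decomposition, no floor division / modulo / remainder branch).

-- ===== PORT A =====
def get_batch_index (LEN : Int) (batch_size : Int) : List (List Int) :=
  -- the `LEN <= batch_size` ValueError guard is excluded by Pre_
  let num := PySem.Int.floordiv LEN batch_size
  let yu := PySem.Int.mod LEN batch_size
  let out : List (List Int) :=
    (PySem.List.pyRange 0 num 1).foldl
      (fun out i => out ++ [[i * batch_size, (i + 1) * batch_size]]) []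
  if yu ≠ 0 then out ++ [[num * batch_size, LEN]] else out

-- ===== PORT B =====
def get_batch_index_alt (LEN : Int) (batch_size : Int) : List (List Int) :=
  -- same ValueError guard as A, excluded by Pre_
  let bounds : List Int := PySem.List.pyRange 0 LEN batch_size ++ [LEN]
  (bounds.zip (PySem.List.slice bounds (some 1) none)).map (fun p => [p.1, p.2])

-- ===== PRECONDITION & SPEC =====
-- Pre_ admits exactly the inputs on which A returns normally: A raises ValueError when
-- LEN ≤ batch_size and ZeroDivisionError when batch_size = 0 < LEN.
def Pre_get_batch_index (LEN : Int) (batch_size : Int) : Prop :=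
  batch_size ≠ 0 ∧ batch_size < LEN
instance (LEN : Int) (batch_size : Int) : Decidable (Pre_get_batch_index LEN batch_size) := by
  unfold Pre_get_batch_index; infer_instance
def pvWitness_get_batch_index : Int × Int := (5, 2)
-- For negative batch_size not dividing LEN, A returns a single out-of-range pair
-- (e.g. [[6, 5]] at (5, -2)) — an artefact of Python floor division on negatives — while B
-- returns the empty batch list, the intended value since no valid batch start exists there.
def D_get_batch_index (LEN : Int) (batch_size : Int) : Prop :=
  batch_size < 0 ∧ ¬ (batch_size ∣ LEN)
instance (LEN : Int) (batch_size : Int) : Decidable (D_get_batch_index LEN batch_size) := by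
  unfold D_get_batch_index; infer_instance
def Spec_get_batch_index (LEN : Int) (batch_size : Int) (out : List (List Int)) : Prop := ¬ D_get_batch_index LEN batch_size → out = get_batch_index_alt LEN batch_size
instance (LEN : Int) (batch_size : Int) (out : List (List Int)) : Decidable (Spec_get_batch_index LEN batch_size out) := by unfold Spec_get_batch_index; infer_instance
def pvDiffWitness_get_batch_index : Int × Int := (5, -2)
def pvDiffWitnessOut_get_batch_index : (List (List Int)) × (List (List Int)) := ([[6, 5]], [])

-- ===== CLAIM (what is proved, stated in full; the proofs are below) =====
def Claim_unchanged_get_batch_index : Prop := ∀ (LEN : Int) (batch_size : Int), Dom_get_batch_index LEN batch_size → Pre_get_batch_index LEN batch_size → Spec_get_batch_index LEN batch_size (get_batch_index LEN batch_size)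
def Claim_changed_get_batch_index : Prop := Dom_get_batch_index (pvDiffWitness_get_batch_index.1) (pvDiffWitness_get_batch_index.2) ∧ Pre_get_batch_index (pvDiffWitness_get_batch_index.1) (pvDiffWitness_get_batch_index.2) ∧ D_get_batch_index (pvDiffWitness_get_batch_index.1) (pvDiffWitness_get_batch_index.2) ∧ get_batch_index (pvDiffWitness_get_batch_index.1) (pvDiffWitness_get_batch_index.2) = pvDiffWitnessOut_get_batch_index.1 ∧ get_batch_index_alt (pvDiffWitness_get_batch_index.1) (pvDiffWitness_get_batch_index.2) = pvDiffWitnessOut_get_batch_index.2 ∧ pvDiffWitnessOut_get_batch_index.1 ≠ pvDiffWitnessOut_get_batch_index.2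

-- ===== LEMMAS AND PROOFS =====

-- adjacent pairs of a list: what B's zip-with-tail computes
def pvPairs (l : List Int) : List (List Int) :=
  (l.zip l.tail).map (fun p => [p.1, p.2])

theorem pvPairs_cons_cons (a b : Int) (l : List Int) :
    pvPairs (a :: b :: l) = [a, b] :: pvPairs (b :: l) := by
  simp [pvPairs]

theorem pv_alt_eq_pairs (LEN bs : Int) :
    get_batch_index_alt LEN bs = pvPairs (PySem.List.pyRange 0 LEN bs ++ [LEN]) := by
  unfold get_batch_index_alt pvPairs
  dsimp only
  rw [PySem.List.slice_from_one]

-- pvPairs over a double snoc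
theorem pvPairs_snoc (xs : List Int) (a L : Int) :
    pvPairs (xs ++ [a] ++ [L]) = pvPairs (xs ++ [a]) ++ [[a, L]] := by
  induction xs with
  | nil => simp [pvPairs]
  | cons x rest ih =>
    cases rest with
    | nil => simp [pvPairs]
    | cons y t =>
      have h1 : (x :: y :: t) ++ [a] ++ [L] = x :: y :: (t ++ [a] ++ [L]) := by simp
      have h2 : (x :: y :: t) ++ [a] = x :: y :: (t ++ [a]) := by simp
      rw [h1, h2, pvPairs_cons_cons, pvPairs_cons_cons]
      have h3 : y :: (t ++ [a] ++ [L]) = (y :: t) ++ [a] ++ [L] := by simp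
      have h4 : y :: (t ++ [a]) = (y :: t) ++ [a] := by simp
      rw [h3, h4, ih]
      simp

theorem pvPairs_range (f : Nat → Int) : ∀ (n : Nat),
    pvPairs ((List.range n).map f) =
      (List.range (n - 1)).map (fun i => [f i, f (i + 1)]) := by
  intro n
  induction n with
  | zero => simp [pvPairs]
  | succ m ih =>
    cases m with
    | zero => simp [pvPairs]
    | succ k =>
      rw [List.range_succ, List.map_append]
      simp only [List.map_cons, List.map_nil]
      have hk : (List.range (k + 1)).map f = (List.range k).map f ++ [f k] := by
        rw [List.range_succ, List.map_append]; simp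
      rw [show ((List.range (k+1)).map f ++ [f (k+1)] : List Int)
            = (List.range k).map f ++ [f k] ++ [f (k+1)] by rw [hk]]
      rw [pvPairs_snoc, ← hk, ih]
      have : (List.range (k + 1 + 1 - 1)).map (fun i => [f i, f (i + 1)])
          = (List.range k).map (fun i => [f i, f (i + 1)]) ++ [[f k, f (k + 1)]] := by
        simp [List.range_succ]
      rw [this]
      simp

theorem pvPairs_range_snoc (f : Nat → Int) (L : Int) (n : Nat) (hn : 1 ≤ n) :
    pvPairs ((List.range n).map f ++ [L]) =
      (List.range (n - 1)).map (fun i => [f i, f (i + 1)]) ++ [[f (n - 1), L]] := by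
  obtain ⟨m, rfl⟩ : ∃ m, n = m + 1 := ⟨n - 1, by omega⟩
  have hk : (List.range (m + 1)).map f = (List.range m).map f ++ [f m] := by
    rw [List.range_succ, List.map_append]; simp
  rw [hk, pvPairs_snoc, ← hk, pvPairs_range]
  simp

-- ceiling count of B's boundary positions: LEN // bs, plus one iff a remainder exists
theorem pv_ceil_count (LEN bs : Int) (hbs : 0 < bs) :
    (LEN + bs - 1) / bs = LEN / bs + (if LEN % bs = 0 then 0 else 1) := by
  have hsplit : LEN + bs - 1 = (LEN % bs + bs - 1) + (LEN / bs) * bs := by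
    have := Int.emod_add_mul_ediv LEN bs
    ring_nf
    omega
  rw [hsplit, Int.add_mul_ediv_right _ _ (by omega : bs ≠ 0)]
  have hr0 : 0 ≤ LEN % bs := Int.emod_nonneg LEN (by omega)
  have hrb : LEN % bs < bs := Int.emod_lt_of_pos LEN hbs
  by_cases h : LEN % bs = 0
  · simp [h]
    exact Int.ediv_eq_zero_of_lt (by omega) (by omega)
  · simp [h]
    have h1 : LEN % bs + bs - 1 = (LEN % bs - 1) + 1 * bs := by ring
    rw [h1, Int.add_mul_ediv_right _ _ (by omega : bs ≠ 0),
        Int.ediv_eq_zero_of_lt (by omega) (by omega)]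
    omega

theorem pv_key (LEN bs : Int) (hbs : 0 < bs) (hlt : bs < LEN) :
    get_batch_index LEN bs = get_batch_index_alt LEN bs := by
  rw [pv_alt_eq_pairs]
  unfold get_batch_index
  have hbsne : bs ≠ 0 := by omega
  dsimp only
  rw [PySem.Int.floordiv_eq_ediv_of_pos hbs, PySem.Int.mod_eq_emod_of_pos hbs,
      PySem.List.foldl_append_singleton_eq_map, PySem.List.pyRange_one,
      PySem.List.pyRange_of_pos 0 LEN hbs]
  simp only [List.nil_append, Int.sub_zero, List.map_map]
  have hq := Int.emod_add_mul_ediv LEN bs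
  have hr0 : 0 ≤ LEN % bs := Int.emod_nonneg LEN hbsne
  have hrb : LEN % bs < bs := Int.emod_lt_of_pos LEN hbs
  have hq1 : 1 ≤ LEN / bs := by
    by_contra h
    have hle : LEN / bs ≤ 0 := by omega
    nlinarith [mul_nonpos_of_nonneg_of_nonpos (le_of_lt hbs) hle]
  have hpos : (0:Int) < LEN := by omega
  rw [if_pos hpos, pv_ceil_count LEN bs hbs]
  by_cases h0 : LEN % bs = 0
  · -- no remainder: the last boundary pair ends exactly at LEN
    rw [if_pos h0, if_neg (by simpa using h0), add_zero]
    have hn1 : 1 ≤ (LEN / bs).toNat := by omega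
    rw [pvPairs_range_snoc _ LEN _ hn1]
    obtain ⟨m, hm⟩ : ∃ m, (LEN / bs).toNat = m + 1 := ⟨(LEN / bs).toNat - 1, by omega⟩
    have hNc : ((m:Int) + 1) = LEN / bs := by omega
    have hLeq : LEN = ((m:Int) + 1) * bs := by
      rw [hNc, mul_comm]; omega
    rw [hm]
    simp only [Nat.add_sub_cancel]
    rw [List.range_succ, List.map_append]
    congr 1
    · apply List.map_congr_left
      intro k hk
      simp only [Function.comp_apply, List.cons.injEq, and_true]
      constructor <;> (push_cast; ring)
    · simp only [Function.comp_apply, List.map_cons, List.map_nil,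
        List.cons.injEq, and_true]
      constructor
      · ring
      · rw [hLeq]; ring
  · -- remainder: one extra boundary, short final pair [num*bs, LEN]
    rw [if_neg h0, if_pos h0]
    have hn1 : 1 ≤ (LEN / bs + 1).toNat := by omega
    rw [pvPairs_range_snoc _ LEN _ hn1]
    have htn : (LEN / bs + 1).toNat - 1 = (LEN / bs).toNat := by omega
    rw [htn]
    congr 1
    · apply List.map_congr_left
      intro k hk
      simp only [Function.comp_apply, List.cons.injEq, and_true]
      constructor <;> (push_cast; ring)
    · have hc : (((LEN / bs).toNat : Int)) = LEN / bs := by omega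
      simp only [hc, List.cons.injEq, and_true]
      ring

-- the divisible negative-batch_size corner: A builds nothing and appends nothing,
-- B's boundary list is just [LEN], whose adjacent-pair list is empty
theorem pv_div_case (LEN bs : Int) (hbs : bs < 0) (hlt : bs < LEN) (hdvd : bs ∣ LEN) :
    get_batch_index LEN bs = get_batch_index_alt LEN bs := by
  rw [pv_alt_eq_pairs]
  unfold get_batch_index
  dsimp only
  have hmod : PySem.Int.mod LEN bs = 0 := (PySem.Int.mod_eq_zero_iff_dvd LEN bs).mpr hdvd
  have hfd := PySem.Int.floordiv_mul_add_mod LEN bs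
  rw [hmod] at hfd
  have hnum : PySem.Int.floordiv LEN bs ≤ 0 := by
    by_contra h
    have h1 : 1 ≤ PySem.Int.floordiv LEN bs := by omega
    nlinarith
  have hLEN : 0 ≤ LEN := by nlinarith
  rw [hmod]
  simp only [ne_eq, not_true_eq_false, if_false]
  rw [PySem.List.pyRange_one_eq_nil hnum]
  simp only [List.foldl_nil]
  rw [show PySem.List.pyRange 0 LEN bs = [] by
    simp [PySem.List.pyRange]
    intro h1
    rw [if_neg (by omega : ¬ 0 < bs), if_neg (by omega : ¬ LEN < 0)]]
  simp [pvPairs]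

-- ===== VERDICT (by name: the statement is the Claim_ definition above) =====
theorem get_batch_index_spec : Claim_unchanged_get_batch_index := by
  intro LEN bs _ hpre
  unfold Spec_get_batch_index
  intro hnd
  rcases lt_or_gt_of_ne hpre.1 with hneg | hpos
  · exact pv_div_case LEN bs hneg hpre.2 (by
      unfold D_get_batch_index at hnd
      by_contra h
      exact hnd ⟨hneg, h⟩)
  · exact pv_key LEN bs hpos hpre.2

theorem get_batch_index_changed : Claim_changed_get_batch_index := by
  unfold Claim_changed_get_batch_index; decide
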